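-- pv_equiv track=rewrite | github.com/yeonnseok/ps-algorithm | 2019 baekjoon/Divide&Conquer/1891_4surfaces.py | gogo
-- ===== SOURCE A (Python) =====
-- def gogo(r, c, size, x, y):
--     if size == 1:
--         return ''
--
--     if x < r+size//2 and y < c + size//2:
--         return "2" + gogo(r, c, size//2, x, y)
--     elif x < r+size//2 and y >= c + size//2:
--         return "1" + gogo(r, c + size//2, size//2, x, y)
--     elif x >= r + size//2 and y < c + size//2:
--         return "3" + gogo(r+size//2, c, size//2, x, y)
--     else:
--         return "4" + gogo(r+size//2, c+size//2, size//2, x, y)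
-- ===== SOURCE B (Python) =====
-- def gogo(r, c, size, x, y):
--     parts = []
--     while size != 1:
--         half = size // 2
--         if x < r + half:
--             if y < c + half:
--                 parts.append('2')
--             else:
--                 parts.append('1')
--                 c += half
--         else:
--             if y < c + half:
--                 parts.append('3')
--                 r += half
--             else:
--                 parts.append('4')
--                 r += half
--                 c += half
--         size = half
--     return ''.join(parts)
-- ===== Notes on version B (the rewrite author's own statement) =====
-- stated objective: idiomatic
-- what changed: Replaces the string-prepending tail recursion with an explicit while-loop that appends quadrant digits to an accumulator list and joins once at the end.
import Mathlib
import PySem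

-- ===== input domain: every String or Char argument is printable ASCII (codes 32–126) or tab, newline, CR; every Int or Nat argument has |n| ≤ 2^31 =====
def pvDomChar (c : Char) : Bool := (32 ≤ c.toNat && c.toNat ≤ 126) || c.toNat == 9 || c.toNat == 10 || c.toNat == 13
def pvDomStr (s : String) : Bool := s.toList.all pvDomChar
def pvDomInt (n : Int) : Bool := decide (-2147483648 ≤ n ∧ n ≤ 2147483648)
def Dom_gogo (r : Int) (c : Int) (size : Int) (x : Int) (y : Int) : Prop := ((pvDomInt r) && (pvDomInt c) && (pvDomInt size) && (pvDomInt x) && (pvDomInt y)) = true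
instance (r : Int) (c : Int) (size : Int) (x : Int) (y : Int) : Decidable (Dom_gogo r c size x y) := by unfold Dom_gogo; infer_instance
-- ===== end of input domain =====

-- B replaces A's string-prepending tail recursion with an explicit while-loop over an
-- accumulator of quadrant digits, joined once at the end (idiomatic iterative form).


-- ===== PORT A =====
-- Literal port of A's recursion.  The `size ≤ 0` guard only makes the function total:
-- Python A never returns there (infinite recursion), and Pre_gogo excludes those inputs.
def gogo (r : Int) (c : Int) (size : Int) (x : Int) (y : Int) : String :=
  if size = 1 then ""
  else if _h0 : size ≤ 0 then ""   -- totality guard; Python diverges here (outside Pre_)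
  else
    let half := PySem.Int.floordiv size 2
    if x < r + half ∧ y < c + half then
      "2" ++ gogo r c half x y
    else if x < r + half ∧ y ≥ c + half then
      "1" ++ gogo r (c + half) half x y
    else if x ≥ r + half ∧ y < c + half then
      "3" ++ gogo (r + half) c half x y
    else
      "4" ++ gogo (r + half) (c + half) half x y
termination_by size.toNat
decreasing_by
  all_goals
    have h2 : PySem.Int.floordiv size 2 = size / 2 :=
      PySem.Int.floordiv_eq_ediv_of_pos (by omega)
    simp only [h2]; omega

-- ===== PORT B =====
-- Port of B's while-loop: accumulator of chars, one join at the end.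
-- The loop stops when size = 1; the `size ≤ 1` form additionally makes it total
-- where Python B would loop forever (size ≤ 0, outside Pre_).
def gogoLoop (r : Int) (c : Int) (size : Int) (x : Int) (y : Int) (acc : List Char) : List Char :=
  if size ≤ 1 then acc
  else
    let half := PySem.Int.floordiv size 2
    if x < r + half then
      if y < c + half then gogoLoop r c half x y (acc ++ ['2'])
      else gogoLoop r (c + half) half x y (acc ++ ['1'])
    else
      if y < c + half then gogoLoop (r + half) c half x y (acc ++ ['3'])
      else gogoLoop (r + half) (c + half) half x y (acc ++ ['4'])
termination_by size.toNat
decreasing_by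
  all_goals
    have h2 : PySem.Int.floordiv size 2 = size / 2 :=
      PySem.Int.floordiv_eq_ediv_of_pos (by omega)
    simp only [h2]; omega

def gogo_alt (r : Int) (c : Int) (size : Int) (x : Int) (y : Int) : String :=
  String.ofList (gogoLoop r c size x y [])

-- ===== PRECONDITION & SPEC =====
-- Pre_ excludes size ≤ 0, on which Python A recurses forever (RecursionError), returning nothing.
def Pre_gogo (r : Int) (c : Int) (size : Int) (x : Int) (y : Int) : Prop := 1 ≤ size
instance (r : Int) (c : Int) (size : Int) (x : Int) (y : Int) : Decidable (Pre_gogo r c size x y) := by unfold Pre_gogo; infer_instance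
def pvWitness_gogo : Int × Int × Int × Int × Int := (0, 0, 8, 3, 5)

def Spec_gogo (r : Int) (c : Int) (size : Int) (x : Int) (y : Int) (out : String) : Prop := out = gogo_alt r c size x y
instance (r : Int) (c : Int) (size : Int) (x : Int) (y : Int) (out : String) : Decidable (Spec_gogo r c size x y out) := by unfold Spec_gogo; infer_instance

-- ===== CLAIM (what is proved, stated in full; the proofs are below) =====
def Claim_equal_gogo : Prop := ∀ (r : Int) (c : Int) (size : Int) (x : Int) (y : Int), Dom_gogo r c size x y → Pre_gogo r c size x y → Spec_gogo r c size x y (gogo r c size x y)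

-- ===== LEMMAS AND PROOFS =====

-- Loop invariant: the loop with accumulator `acc` produces `acc` followed by A's answer.
theorem gogoLoop_eq (r c size x y : Int) : ∀ (acc : List Char),
    gogoLoop r c size x y acc = acc ++ (gogo r c size x y).toList := by
  induction r, c, size using gogo.induct (x := x) (y := y) with
  | case1 r c =>
      intro acc
      rw [gogoLoop, gogo]
      simp
  | case2 r c size h h0 =>
      intro acc
      rw [gogoLoop, gogo]
      simp [h, h0, (by omega : size ≤ 1)]
  | case3 r c size h h0 half hc ih =>
      intro acc
      have e : half = PySem.Int.floordiv size 2 := rfl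
      rw [e] at hc ih
      rw [gogoLoop, gogo]
      simp only [if_neg h, dif_neg h0, if_neg (by omega : ¬ size ≤ 1), if_pos hc.1, if_pos hc.2,
        if_pos hc]
      rw [ih]
      simp
  | case4 r c size h h0 half hc1 hc2 ih =>
      intro acc
      have e : half = PySem.Int.floordiv size 2 := rfl
      rw [e] at hc1 hc2 ih
      obtain ⟨hx, hy⟩ := hc2
      rw [gogoLoop, gogo]
      simp only [if_neg h, dif_neg h0, if_neg (by omega : ¬ size ≤ 1), if_pos hx,
        if_neg (by omega : ¬ y < c + PySem.Int.floordiv size 2), if_neg hc1,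
        if_pos (And.intro hx hy)]
      rw [ih]
      simp
  | case5 r c size h h0 half hc1 hc2 hc3 ih =>
      intro acc
      have e : half = PySem.Int.floordiv size 2 := rfl
      rw [e] at hc1 hc2 hc3 ih
      obtain ⟨hx, hy⟩ := hc3
      rw [gogoLoop, gogo]
      simp only [if_neg h, dif_neg h0, if_neg (by omega : ¬ size ≤ 1),
        if_neg (by omega : ¬ x < r + PySem.Int.floordiv size 2), if_pos hy, if_neg hc1, if_neg hc2,
        if_pos (And.intro hx hy)]
      rw [ih]
      simp
  | case6 r c size h h0 half hc1 hc2 hc3 ih =>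
      intro acc
      have e : half = PySem.Int.floordiv size 2 := rfl
      rw [e] at hc1 hc2 hc3 ih
      rw [gogoLoop, gogo]
      simp only [if_neg h, dif_neg h0, if_neg (by omega : ¬ size ≤ 1),
        if_neg (by omega : ¬ x < r + PySem.Int.floordiv size 2),
        if_neg (by omega : ¬ y < c + PySem.Int.floordiv size 2), if_neg hc1, if_neg hc2, if_neg hc3,
        ih, String.toList_append, List.append_assoc]
      rfl

-- ===== VERDICT (by name: the statement is the Claim_ definition above) =====
theorem gogo_spec : Claim_equal_gogo := by
  intro r c size x y _hd _hp
  unfold Spec_gogo gogo_alt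
  rw [gogoLoop_eq]
  simp [String.ofList_toList]
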